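-- pv_equiv track=rewrite | github.com/open-data-toronto/operations | scripts/sync_remote_file_times.py | build_notification_message
-- ===== SOURCE A (Python) =====
-- def build_notification_message(sync_results: dict):
--     message_lines = [""]
--
--     for result_type in ["synced", "error", "unchanged"]:
--         result_type_resources = [r for r in sync_results if r["result"] == result_type]
--         result_type_packages = set(
--             [r["package_name"] for r in sync_results if r["result"] == result_type]
--         )
--
--         lines = [
--             "*{}\tpackages: {}\tresources: {}*".format(
--                 result_type, len(result_type_packages), len(result_type_resources),
--             )
--         ]
--
--         pkg = None
--         for index, r in enumerate(result_type_resources):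
--             if result_type == "unchanged":
--                 continue
--
--             if pkg != r["package_name"]:
--                 lines.append(r["package_name"])
--
--             lines.append(
--                 "{}. _{}_: `{}`".format(
--                     index + 1, r["resource_name"], r["file_last_modified"],
--                 )
--             )
--
--         message_lines.extend(lines)
--
--     return "\n".join(message_lines)
-- ===== SOURCE B (Python) =====
-- def build_notification_message(sync_results):
--     groups = {"synced": [], "error": [], "unchanged": []}
--     pkgs = {"synced": set(), "error": set(), "unchanged": set()}
--     for r in sync_results:
--         t = r["result"]
--         if t in groups:
--             groups[t].append(r)
--             pkgs[t].add(r["package_name"])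
--     parts = [""]
--     for t in ["synced", "error", "unchanged"]:
--         parts.append(
--             "*{}\tpackages: {}\tresources: {}*".format(
--                 t, len(pkgs[t]), len(groups[t])
--             )
--         )
--         if t != "unchanged":
--             for i, r in enumerate(groups[t]):
--                 parts.append(r["package_name"])
--                 parts.append(
--                     "{}. _{}_: `{}`".format(
--                         i + 1, r["resource_name"], r["file_last_modified"]
--                     )
--                 )
--     return "\n".join(parts)
-- ===== Notes on version B (the rewrite author's own statement) =====
-- stated objective: simpler
-- what changed: A filters the whole input list twice per result type (six passes plus a per-type accumulator loop with the never-updated pkg variable); B makes one bucketing pass that builds the three group lists and package-name sets, then a plain formatting loop over the prebuilt buckets.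
import Mathlib
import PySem

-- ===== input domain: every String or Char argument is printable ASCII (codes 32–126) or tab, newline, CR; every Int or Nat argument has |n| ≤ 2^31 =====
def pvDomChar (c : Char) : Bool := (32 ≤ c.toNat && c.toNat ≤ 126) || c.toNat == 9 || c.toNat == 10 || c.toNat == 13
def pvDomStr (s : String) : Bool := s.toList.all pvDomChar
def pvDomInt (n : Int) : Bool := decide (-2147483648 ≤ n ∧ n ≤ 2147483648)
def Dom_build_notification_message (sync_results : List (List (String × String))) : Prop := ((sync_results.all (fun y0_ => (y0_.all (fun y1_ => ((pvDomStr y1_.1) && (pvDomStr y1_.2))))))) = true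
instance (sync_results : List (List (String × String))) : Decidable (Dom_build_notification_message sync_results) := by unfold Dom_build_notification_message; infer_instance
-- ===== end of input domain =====

-- ===== PORT A =====
-- B replaces A's six filter passes (two per result type) and the per-type accumulator loop
-- by one bucketing pass over the input followed by a formatting loop over the prebuilt buckets.
-- r["k"] dict access; total form with default "" — Pre_ guarantees the key is present (Python raises KeyError otherwise)
def pvGetKey (r : List (String × String)) (k : String) : String :=
  ((PySem.Dict.ofList r).get? k).getD ""

def pvFmtHeader (t : String) (np : Int) (nr : Nat) : String :=
  "*" ++ t ++ "\tpackages: " ++ PySem.Int.toStr np ++ "\tresources: " ++ PySem.Int.toStr (nr : Int) ++ "*"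

def pvFmtRes (i : Int) (rn fm : String) : String :=
  PySem.Int.toStr i ++ ". _" ++ rn ++ "_: `" ++ fm ++ "`"

-- one iteration of A's outer loop: lines for one result_type
def pvABlock (sync_results : List (List (String × String))) (result_type : String) : List String :=
  let result_type_resources := sync_results.filter (fun r => pvGetKey r "result" == result_type)
  let result_type_packages := PySem.Set.ofList
    ((sync_results.filter (fun r => pvGetKey r "result" == result_type)).map (fun r => pvGetKey r "package_name"))
  let init : List String × Option String :=
    ([pvFmtHeader result_type (PySem.Set.len result_type_packages) result_type_resources.length], none)
  let st := (PySem.List.enumerate result_type_resources).foldl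
    (fun (st : List String × Option String) ir =>
      if result_type == "unchanged" then st
      else
        let lines := if st.2 ≠ some (pvGetKey ir.2 "package_name")
                     then st.1 ++ [pvGetKey ir.2 "package_name"] else st.1
        (lines ++ [pvFmtRes (ir.1 + 1) (pvGetKey ir.2 "resource_name") (pvGetKey ir.2 "file_last_modified")], st.2))
    init
  st.1

def build_notification_message (sync_results : List (List (String × String))) : String :=
  PySem.Str.join "\n"
    (["synced", "error", "unchanged"].foldl (fun acc t => acc ++ pvABlock sync_results t) [""])

-- ===== PORT B =====
def pvBGet (r : List (String × String)) (k : String) : String :=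
  ((PySem.Dict.ofList r).get? k).getD ""

structure PvBuckets where
  gs : List (List (String × String))
  ge : List (List (String × String))
  gu : List (List (String × String))
  ps : PySem.Set String
  pe : PySem.Set String
  pu : PySem.Set String
deriving Repr

-- the single bucketing pass of B ('for r in sync_results: if t in groups: …')
def pvBuckets (sync_results : List (List (String × String))) : PvBuckets :=
  sync_results.foldl
    (fun b r =>
      let t := pvBGet r "result"
      if t == "synced" then
        { b with gs := b.gs ++ [r], ps := PySem.Set.add b.ps (pvBGet r "package_name") }
      else if t == "error" then
        { b with ge := b.ge ++ [r], pe := PySem.Set.add b.pe (pvBGet r "package_name") }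
      else if t == "unchanged" then
        { b with gu := b.gu ++ [r], pu := PySem.Set.add b.pu (pvBGet r "package_name") }
      else b)
    ⟨[], [], [], PySem.Set.empty, PySem.Set.empty, PySem.Set.empty⟩

def pvBHeader (t : String) (pk : PySem.Set String) (grp : List (List (String × String))) : String :=
  "*" ++ t ++ "\tpackages: " ++ PySem.Int.toStr (PySem.Set.len pk) ++ "\tresources: " ++ PySem.Int.toStr (grp.length : Int) ++ "*"

def pvBLine (i : Int) (r : List (String × String)) : String :=
  PySem.Int.toStr (i + 1) ++ ". _" ++ pvBGet r "resource_name" ++ "_: `" ++ pvBGet r "file_last_modified" ++ "`"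

-- one iteration of B's formatting loop over the ordered types
def pvBSeg (t : String) (pk : PySem.Set String) (grp : List (List (String × String))) : List String :=
  pvBHeader t pk grp ::
    (if t != "unchanged" then
      (PySem.List.enumerate grp).flatMap (fun ir => [pvBGet ir.2 "package_name", pvBLine ir.1 ir.2])
    else [])

def build_notification_message_alt (sync_results : List (List (String × String))) : String :=
  let b := pvBuckets sync_results
  PySem.Str.join "\n"
    ([""] ++ pvBSeg "synced" b.ps b.gs ++ pvBSeg "error" b.pe b.ge ++ pvBSeg "unchanged" b.pu b.gu)

-- ===== PRECONDITION & SPEC =====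
-- Pre_ = exactly the inputs where Python A returns: every record has the keys it dereferences
-- ("result" always; "package_name" when the result is one of the three types; the two resource keys
-- when it is "synced" or "error"); elsewhere Python A raises KeyError.
def Pre_build_notification_message (sync_results : List (List (String × String))) : Prop :=
  ∀ r ∈ sync_results,
    (PySem.Dict.ofList r).contains "result" = true ∧
    ((((PySem.Dict.ofList r).get? "result").getD "" = "synced" ∨
      ((PySem.Dict.ofList r).get? "result").getD "" = "error" ∨
      ((PySem.Dict.ofList r).get? "result").getD "" = "unchanged") →
        (PySem.Dict.ofList r).contains "package_name" = true) ∧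
    ((((PySem.Dict.ofList r).get? "result").getD "" = "synced" ∨
      ((PySem.Dict.ofList r).get? "result").getD "" = "error") →
        (PySem.Dict.ofList r).contains "resource_name" = true ∧
        (PySem.Dict.ofList r).contains "file_last_modified" = true)
instance (sync_results : List (List (String × String))) : Decidable (Pre_build_notification_message sync_results) := by
  unfold Pre_build_notification_message; infer_instance

def pvWitness_build_notification_message : (List (List (String × String))) :=
  [[("result", "synced"), ("package_name", "pkg-a"), ("resource_name", "res-1"), ("file_last_modified", "2020-01-01")],
   [("result", "unchanged"), ("package_name", "pkg-b")]]

def Spec_build_notification_message (sync_results : List (List (String × String))) (out : String) : Prop := out = build_notification_message_alt sync_results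
instance (sync_results : List (List (String × String))) (out : String) : Decidable (Spec_build_notification_message sync_results out) := by unfold Spec_build_notification_message; infer_instance

-- ===== CLAIM (what is proved, stated in full; the proofs are below) =====
def Claim_equal_build_notification_message : Prop := ∀ (sync_results : List (List (String × String))), Dom_build_notification_message sync_results → Pre_build_notification_message sync_results → Spec_build_notification_message sync_results (build_notification_message sync_results)

-- ===== LEMMAS AND PROOFS =====

theorem pvBuckets_go (l : List (List (String × String))) (b0 : PvBuckets) :
    l.foldl
      (fun b r =>
        let t := pvBGet r "result"
        if t == "synced" then
          { b with gs := b.gs ++ [r], ps := PySem.Set.add b.ps (pvBGet r "package_name") }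
        else if t == "error" then
          { b with ge := b.ge ++ [r], pe := PySem.Set.add b.pe (pvBGet r "package_name") }
        else if t == "unchanged" then
          { b with gu := b.gu ++ [r], pu := PySem.Set.add b.pu (pvBGet r "package_name") }
        else b) b0 =
      ⟨b0.gs ++ l.filter (fun r => pvBGet r "result" == "synced"),
       b0.ge ++ l.filter (fun r => pvBGet r "result" == "error"),
       b0.gu ++ l.filter (fun r => pvBGet r "result" == "unchanged"),
       PySem.Set.update b0.ps ((l.filter (fun r => pvBGet r "result" == "synced")).map (fun r => pvBGet r "package_name")),
       PySem.Set.update b0.pe ((l.filter (fun r => pvBGet r "result" == "error")).map (fun r => pvBGet r "package_name")),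
       PySem.Set.update b0.pu ((l.filter (fun r => pvBGet r "result" == "unchanged")).map (fun r => pvBGet r "package_name"))⟩ := by
  induction l generalizing b0 with
  | nil => simp [PySem.Set.update]
  | cons r l ih =>
    rw [List.foldl_cons, ih]
    by_cases h1 : pvBGet r "result" = "synced"
    · simp [h1, PySem.Set.update]
    · by_cases h2 : pvBGet r "result" = "error"
      · simp [h2, PySem.Set.update]
      · by_cases h3 : pvBGet r "result" = "unchanged"
        · simp [h3, PySem.Set.update]
        · simp [h1, h2, h3]

theorem pvBuckets_spec (l : List (List (String × String))) :
    pvBuckets l =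
      ⟨l.filter (fun r => pvBGet r "result" == "synced"),
       l.filter (fun r => pvBGet r "result" == "error"),
       l.filter (fun r => pvBGet r "result" == "unchanged"),
       PySem.Set.ofList ((l.filter (fun r => pvBGet r "result" == "synced")).map (fun r => pvBGet r "package_name")),
       PySem.Set.ofList ((l.filter (fun r => pvBGet r "result" == "error")).map (fun r => pvBGet r "package_name")),
       PySem.Set.ofList ((l.filter (fun r => pvBGet r "result" == "unchanged")).map (fun r => pvBGet r "package_name"))⟩ := by
  unfold pvBuckets
  rw [pvBuckets_go]
  simp [PySem.Set.update, PySem.Set.ofList, PySem.Set.empty]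

theorem pvAFold_loop (xs : List (Int × List (String × String))) (acc : List String) :
    xs.foldl
      (fun (st : List String × Option String) ir =>
        ((if st.2 = some (pvGetKey ir.2 "package_name") then st.1 else st.1 ++ [pvGetKey ir.2 "package_name"]) ++
           [pvFmtRes (ir.1 + 1) (pvGetKey ir.2 "resource_name") (pvGetKey ir.2 "file_last_modified")], st.2))
      (acc, none) =
    (acc ++ xs.flatMap (fun ir => [pvGetKey ir.2 "package_name", pvFmtRes (ir.1 + 1) (pvGetKey ir.2 "resource_name") (pvGetKey ir.2 "file_last_modified")]), none) := by
  induction xs generalizing acc with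
  | nil => simp
  | cons p xs ih => simp [ih]

theorem pvABlock_eq_seg (l : List (List (String × String))) (t : String) (ht : (t == "unchanged") = false) :
    pvABlock l t =
      pvBSeg t
        (PySem.Set.ofList ((l.filter (fun r => pvGetKey r "result" == t)).map (fun r => pvGetKey r "package_name")))
        (l.filter (fun r => pvGetKey r "result" == t)) := by
  unfold pvABlock pvBSeg
  simp only [ht, Bool.false_eq_true, if_false, ne_eq, ite_not]
  rw [pvAFold_loop]
  simp [pvBHeader, pvFmtHeader, pvBLine, pvFmtRes, pvBGet, pvGetKey]
  intro h
  rw [h] at ht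
  simp at ht

theorem pvABlock_unchanged (l : List (List (String × String))) :
    pvABlock l "unchanged" =
      pvBSeg "unchanged"
        (PySem.Set.ofList ((l.filter (fun r => pvGetKey r "result" == "unchanged")).map (fun r => pvGetKey r "package_name")))
        (l.filter (fun r => pvGetKey r "result" == "unchanged")) := by
  unfold pvABlock pvBSeg
  simp [List.foldl_fixed, pvBHeader, pvFmtHeader, pvGetKey]

-- ===== VERDICT (by name: the statement is the Claim_ definition above) =====
theorem build_notification_message_spec : Claim_equal_build_notification_message := by
  intro l _ _
  unfold Spec_build_notification_message build_notification_message build_notification_message_alt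
  rw [pvBuckets_spec]
  simp only [List.foldl, List.append_assoc]
  rw [pvABlock_eq_seg l "synced" (by decide), pvABlock_eq_seg l "error" (by decide), pvABlock_unchanged l]
  simp [pvBGet, pvGetKey]
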